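-- pv_equiv track=rewrite | github.com/JulianH89/oligo-finder-nf | bin/convert_to_order.py | order_oligo_sense_no_tripurine
-- ===== SOURCE A (Python) =====
-- def order_oligo_sense_no_tripurine(oligo, sense_length):
--     """
--     Converts a sense strand to TriLink format with a fixed modification pattern,
--     without the special tripurine handling.
--
--     Args:
--         oligo: The input oligonucleotide sequence.
--         sense_length: The length of the sense strand to process.
--
--     Returns:
--         The formatted string for synthesis.
--     """
--     sense = oligo[5 : 5 + sense_length]
--     mod_nuc_parts = []
--
--     # Define modifications for different positions
--     full_m_mod = {'C': 'mC', 'U': 'mU', 'A': 'mA', 'G': 'mG'}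
--     partial_m_mod = {'C': 'mC', 'U': 'mU', 'A': 'A', 'G': 'G'}
--
--     for i, base in enumerate(sense):
--         if i < 2:
--             mod_nuc_parts.append(full_m_mod.get(base, base) + ".")
--         elif 2 <= i < 12:
--             mod_nuc_parts.append(partial_m_mod.get(base, base) + ".")
--         elif i == 12:
--             mod_nuc_parts.append(partial_m_mod.get(base, base) + "#")
--         else: # i > 12
--             mod_nuc_parts.append(full_m_mod.get(base, base))
--
--     return "".join(mod_nuc_parts) + "#mA1"
-- ===== SOURCE B (Python) =====
-- def order_oligo_sense_no_tripurine(oligo, sense_length):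
--     """Back-to-front single-accumulator rewrite: no parts list, no join, and the
--     two positional dicts are replaced by one boolean methylation rule
--     (m-prefix iff the base is C/U/A/G and either the position is in a full-mod
--     region (i < 2 or i > 12) or the base is a pyrimidine C/U)."""
--     sense = oligo[5 : 5 + sense_length]
--     out = "#mA1"
--     for i, base in reversed(list(enumerate(sense))):
--         methyl = base in "CUAG" and (i < 2 or i > 12 or base in "CU")
--         sep = "." if i < 12 else ("#" if i == 12 else "")
--         out = ("m" + base if methyl else base) + sep + out
--     return out
-- ===== Notes on version B (the rewrite author's own statement) =====
-- stated objective: alternative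
-- what changed: Builds the result back-to-front with a single string accumulator over reversed(enumerate(sense)) (no parts list, no join) and replaces the two positional modification dicts by one boolean methylation rule ('m'-prefix iff the base is in CUAG and the position is fully modified (i<2 or i>12) or the base is C/U).
import Mathlib
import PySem

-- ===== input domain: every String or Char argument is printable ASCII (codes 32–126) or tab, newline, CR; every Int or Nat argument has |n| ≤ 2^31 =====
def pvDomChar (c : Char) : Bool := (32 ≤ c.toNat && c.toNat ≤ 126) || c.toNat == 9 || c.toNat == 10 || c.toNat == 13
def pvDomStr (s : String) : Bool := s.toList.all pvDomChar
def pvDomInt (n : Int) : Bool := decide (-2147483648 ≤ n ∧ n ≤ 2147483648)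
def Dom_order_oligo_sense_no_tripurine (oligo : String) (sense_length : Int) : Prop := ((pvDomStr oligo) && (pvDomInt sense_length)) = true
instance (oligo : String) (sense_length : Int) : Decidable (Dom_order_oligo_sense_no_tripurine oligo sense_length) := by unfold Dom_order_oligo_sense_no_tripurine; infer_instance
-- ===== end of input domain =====

-- B builds the output back-to-front with a single string accumulator (no parts list,
-- no join) and replaces the two positional dicts by one boolean methylation rule
-- (objective: alternative decomposition; not faster).


-- ===== PORT A =====
-- one enumerate loop, branching on the index, accumulating the parts list, joined at the end
def order_oligo_sense_no_tripurine (oligo : String) (sense_length : Int) : String :=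
  let sense := PySem.List.slice oligo.toList (some 5) (some (5 + sense_length))
  let full_m_mod : PySem.Dict Char (List Char) :=
    PySem.Dict.ofList [('C', ['m','C']), ('U', ['m','U']), ('A', ['m','A']), ('G', ['m','G'])]
  let partial_m_mod : PySem.Dict Char (List Char) :=
    PySem.Dict.ofList [('C', ['m','C']), ('U', ['m','U']), ('A', ['A']), ('G', ['G'])]
  let mod_nuc_parts := (PySem.List.enumerate sense 0).foldl (fun acc p =>
    if p.1 < 2 then acc ++ [full_m_mod.getD p.2 [p.2] ++ ['.']]
    else if 2 ≤ p.1 ∧ p.1 < 12 then acc ++ [partial_m_mod.getD p.2 [p.2] ++ ['.']]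
    else if p.1 = 12 then acc ++ [partial_m_mod.getD p.2 [p.2] ++ ['#']]
    else acc ++ [full_m_mod.getD p.2 [p.2]]) []
  String.ofList (PySem.Chars.join [] mod_nuc_parts ++ ['#','m','A','1'])

-- ===== PORT B =====
-- reversed enumerate, one accumulator string built back-to-front; boolean methylation rule
def order_oligo_sense_no_tripurine_alt (oligo : String) (sense_length : Int) : String :=
  let sense := PySem.List.slice oligo.toList (some 5) (some (5 + sense_length))
  let out := (PySem.List.enumerate sense 0).reverse.foldl (fun out p =>
    let methyl := (['C','U','A','G'].contains p.2) &&
      (decide (p.1 < 2) || decide (p.1 > 12) || ['C','U'].contains p.2)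
    let sep : List Char := if p.1 < 12 then ['.'] else if p.1 = 12 then ['#'] else []
    (if methyl then 'm' :: [p.2] else [p.2]) ++ sep ++ out) ['#','m','A','1']
  String.ofList out

-- ===== PRECONDITION & SPEC =====
def Spec_order_oligo_sense_no_tripurine (oligo : String) (sense_length : Int) (out : String) : Prop := out = order_oligo_sense_no_tripurine_alt oligo sense_length
instance (oligo : String) (sense_length : Int) (out : String) : Decidable (Spec_order_oligo_sense_no_tripurine oligo sense_length out) := by unfold Spec_order_oligo_sense_no_tripurine; infer_instance

-- ===== CLAIM (what is proved, stated in full; the proofs are below) =====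
def Claim_equal_order_oligo_sense_no_tripurine : Prop := ∀ (oligo : String) (sense_length : Int), Dom_order_oligo_sense_no_tripurine oligo sense_length → Spec_order_oligo_sense_no_tripurine oligo sense_length (order_oligo_sense_no_tripurine oligo sense_length)

-- ===== LEMMAS AND PROOFS =====

-- "".join with empty separator is flatten
theorem pv_join_nil_flatten (ps : List (List Char)) : PySem.Chars.join [] ps = ps.flatten := by
  simp only [PySem.Chars.join, List.intercalate]
  induction ps with
  | nil => rfl
  | cons h t ih => cases t <;> simp_all [List.intersperse]

-- A's append-accumulating fold is map
theorem pv_foldA_eq_map (full partial_ : PySem.Dict Char (List Char)) (l : List (Int × Char))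
    (acc : List (List Char)) :
    l.foldl (fun acc p =>
      if p.1 < 2 then acc ++ [full.getD p.2 [p.2] ++ ['.']]
      else if 2 ≤ p.1 ∧ p.1 < 12 then acc ++ [partial_.getD p.2 [p.2] ++ ['.']]
      else if p.1 = 12 then acc ++ [partial_.getD p.2 [p.2] ++ ['#']]
      else acc ++ [full.getD p.2 [p.2]]) acc
    = acc ++ l.map (fun p =>
      if p.1 < 2 then full.getD p.2 [p.2] ++ ['.']
      else if 2 ≤ p.1 ∧ p.1 < 12 then partial_.getD p.2 [p.2] ++ ['.']
      else if p.1 = 12 then partial_.getD p.2 [p.2] ++ ['#']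
      else full.getD p.2 [p.2]) := by
  induction l generalizing acc with
  | nil => simp
  | cons h t ih => simp only [List.foldl_cons, List.map_cons]; split_ifs <;> rw [ih] <;> simp

-- B's back-to-front prepend loop over the reversed list is map-then-flatten
theorem pv_revfold_eq_map (f : Int × Char → List Char) (l : List (Int × Char)) (t : List Char) :
    l.reverse.foldl (fun out p => f p ++ out) t = (l.map f).flatten ++ t := by
  induction l generalizing t with
  | nil => rfl
  | cons h tl ih =>
    simp only [List.reverse_cons, List.foldl_append, List.foldl_cons, List.foldl_nil,
      List.map_cons, List.flatten_cons, ih, List.append_assoc]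

-- the two token computations agree at every nonnegative index
theorem pv_tok_eq (i : Int) (hi : 0 ≤ i) (b : Char)
    (full partial_ : PySem.Dict Char (List Char))
    (hfull : full = PySem.Dict.ofList [('C', ['m','C']), ('U', ['m','U']), ('A', ['m','A']), ('G', ['m','G'])])
    (hpartial : partial_ = PySem.Dict.ofList [('C', ['m','C']), ('U', ['m','U']), ('A', ['A']), ('G', ['G'])]) :
    (if i < 2 then full.getD b [b] ++ ['.']
     else if 2 ≤ i ∧ i < 12 then partial_.getD b [b] ++ ['.']
     else if i = 12 then partial_.getD b [b] ++ ['#']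
     else full.getD b [b])
    = (if (['C','U','A','G'].contains b) &&
          (decide (i < 2) || decide (i > 12) || ['C','U'].contains b)
       then 'm' :: [b] else [b])
      ++ (if i < 12 then ['.'] else if i = 12 then ['#'] else []) := by
  subst hfull hpartial
  have hfullD : ∀ c : Char,
      (PySem.Dict.ofList [('C', ['m','C']), ('U', ['m','U']), ('A', ['m','A']), ('G', ['m','G'])]).getD c [c]
      = if ['C','U','A','G'].contains c then 'm' :: [c] else [c] := by
    intro c
    by_cases h1 : c = 'C'; · subst h1; decide
    by_cases h2 : c = 'U'; · subst h2; decide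
    by_cases h3 : c = 'A'; · subst h3; decide
    by_cases h4 : c = 'G'; · subst h4; decide
    have e : PySem.Dict.ofList [('C', (['m','C']:List Char)), ('U', ['m','U']), ('A', ['m','A']), ('G', ['m','G'])]
        = PySem.Dict.mk [('C', ['m','C']), ('U', ['m','U']), ('A', ['m','A']), ('G', ['m','G'])] := by decide
    rw [e]
    simp only [PySem.Dict.getD, PySem.Dict.get?_mk_cons]
    rw [show (('C':Char) == c) = false by simp [Ne.symm h1], show (('U':Char) == c) = false by simp [Ne.symm h2],
        show (('A':Char) == c) = false by simp [Ne.symm h3], show (('G':Char) == c) = false by simp [Ne.symm h4]]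
    simp [h1, h2, h3, h4, PySem.Dict.get?]
  have hpartD : ∀ c : Char,
      (PySem.Dict.ofList [('C', ['m','C']), ('U', ['m','U']), ('A', ['A']), ('G', ['G'])]).getD c [c]
      = if (['C','U','A','G'].contains c) && (['C','U'].contains c) then 'm' :: [c] else [c] := by
    intro c
    by_cases h1 : c = 'C'; · subst h1; decide
    by_cases h2 : c = 'U'; · subst h2; decide
    by_cases h3 : c = 'A'; · subst h3; decide
    by_cases h4 : c = 'G'; · subst h4; decide
    have e : PySem.Dict.ofList [('C', (['m','C']:List Char)), ('U', ['m','U']), ('A', ['A']), ('G', ['G'])]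
        = PySem.Dict.mk [('C', ['m','C']), ('U', ['m','U']), ('A', ['A']), ('G', ['G'])] := by decide
    rw [e]
    simp only [PySem.Dict.getD, PySem.Dict.get?_mk_cons]
    rw [show (('C':Char) == c) = false by simp [Ne.symm h1], show (('U':Char) == c) = false by simp [Ne.symm h2],
        show (('A':Char) == c) = false by simp [Ne.symm h3], show (('G':Char) == c) = false by simp [Ne.symm h4]]
    simp [h1, h2, h3, h4, PySem.Dict.get?]
  by_cases hlt2 : i < 2
  · have h12 : i < 12 := by omega
    have : (decide (i < 2) || decide (i > 12) || ['C','U'].contains b) = true := by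
      simp [hlt2]
    rw [if_pos hlt2, if_pos h12, hfullD, this, Bool.and_true]
  · by_cases hmid : 2 ≤ i ∧ i < 12
    · have h2 : ¬ (i < 2) := by omega
      have h12 : ¬ (i > 12) := by omega
      rw [if_neg hlt2, if_pos hmid, hpartD, if_pos hmid.2]
      simp [h2, h12]
    · by_cases h12 : i = 12
      · subst h12
        rw [if_neg hlt2, if_neg hmid, if_pos rfl, hpartD]
        have hn : ¬ ((12:Int) < 12) := by omega
        rw [if_neg hn, if_pos rfl]
        simp
      · have hgt : i > 12 := by omega
        have hn12 : ¬ (i < 12) := by omega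
        rw [if_neg hlt2, if_neg hmid, if_neg h12, hfullD, if_neg hn12, if_neg h12]
        have : (decide (i < 2) || decide (i > 12) || ['C','U'].contains b) = true := by
          simp [hgt]
        rw [this, Bool.and_true]
        simp

-- ===== VERDICT (by name: the statement is the Claim_ definition above) =====
theorem order_oligo_sense_no_tripurine_spec : Claim_equal_order_oligo_sense_no_tripurine := by
  intro oligo sense_length _
  unfold Spec_order_oligo_sense_no_tripurine
  dsimp only [order_oligo_sense_no_tripurine, order_oligo_sense_no_tripurine_alt]
  rw [pv_foldA_eq_map, List.nil_append, pv_join_nil_flatten, pv_revfold_eq_map]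
  congr 1
  apply congrArg (· ++ ['#','m','A','1'])
  apply congrArg List.flatten
  apply List.map_congr_left
  intro p hp
  rcases (PySem.List.mem_enumerate_iff _ _ _).1 hp with ⟨k, hk, rfl⟩
  exact pv_tok_eq _ (by omega) _ _ _ rfl rfl
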